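-- pv_equiv track=rewrite | github.com/antman1935/sequencer | Commands/StirlingPermutations.py | getInsertionPoints
-- ===== SOURCE A (Python) =====
-- def getDescents(perm: list[int]):
--     descents = []
--     for i in range(len(perm)-1):
--         if perm[i] > perm[i+1]:
--             descents.append(i)
--     return descents
--
-- def getInsertionPoints(perm: list[int]):
--     insertion_indices = []
--     descent = getDescents(perm)
--     descent_index = 0 # stays at the next descent coming after position j
--     for j in range(len(perm)):
--         # if there is a descent here, you can insert ii
--         if descent and descent_index < len(descent) and descent[descent_index] == j:
--             insertion_indices.append(j)
--             descent_index += 1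
--         # if there is a weak ascent and no more descents, you can insert
--         elif not descent or len(descent) <= descent_index:
--             insertion_indices.append(j)
--         elif j != len(perm)-1 and len(descent) > descent_index:
--         # if there is a weak ascent and the next character after this is
--         # <= the leading term of the next run, then you can insert
--             next_char = perm[j+1]
--             next_leading_term = perm[descent[descent_index] + 1]
--             if next_char <= next_leading_term:
--                 insertion_indices.append(j)
--     return insertion_indices
-- ===== SOURCE B (Python) =====
-- def getInsertionPoints(perm: list[int]):
--     n = len(perm)
--     out = []
--     start = 0
--     while start < n:
--         end = start
--         while end + 1 < n and perm[end] <= perm[end + 1]: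
--             end += 1
--         # maximal weakly ascending run perm[start..end]
--         if end + 1 < n:
--             lead = perm[end + 1]  # leading term of the next run
--             for j in range(start, end):
--                 if perm[j + 1] <= lead:
--                     out.append(j)
--             out.append(end)  # the run ends in a descent
--         else:
--             out.extend(range(start, end + 1))  # final run: everything can take an insertion
--         start = end + 1
--     return out
-- ===== Notes on version B (the rewrite author's own statement) =====
-- stated objective: alternative
-- what changed: B segments the permutation into maximal weakly ascending runs with a nested while loop and decides each run locally (interior positions by comparing the next element to the following run's leading term, the run-ending descent always, the final run wholly), discarding A's global descent list and advancing pointer.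
import Mathlib
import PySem

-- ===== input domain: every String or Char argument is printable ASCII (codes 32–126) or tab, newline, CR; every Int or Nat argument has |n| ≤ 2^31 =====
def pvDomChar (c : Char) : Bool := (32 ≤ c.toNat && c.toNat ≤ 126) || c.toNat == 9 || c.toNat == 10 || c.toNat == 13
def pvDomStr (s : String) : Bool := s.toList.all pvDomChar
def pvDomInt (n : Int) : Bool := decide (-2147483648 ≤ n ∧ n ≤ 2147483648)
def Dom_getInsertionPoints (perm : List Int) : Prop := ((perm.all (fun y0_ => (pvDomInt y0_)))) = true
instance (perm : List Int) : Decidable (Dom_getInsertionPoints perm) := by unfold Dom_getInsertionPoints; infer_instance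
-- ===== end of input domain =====

-- B replaces A's global descent list + advancing pointer with a run segmentation:
-- a nested while loop cuts the permutation into maximal weakly ascending runs and each
-- run is decided locally (objective: alternative decomposition, same O(n) cost).

-- ===== PORT A =====
def getDescents (perm : List Int) : List Int :=
  (PySem.List.pyRange 0 ((perm.length : Int) - 1) 1).foldl
    (fun descents i =>
      if PySem.List.pyGetD perm i 0 > PySem.List.pyGetD perm (i + 1) 0
      then descents ++ [i] else descents) []

def getInsertionPoints (perm : List Int) : List Int :=
  let descent := getDescents perm
  ((PySem.List.pyRange 0 ((perm.length : Int)) 1).foldl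
    (fun (s : List Int × Int) j =>
      if descent ≠ [] ∧ s.2 < (descent.length : Int) ∧ PySem.List.pyGetD descent s.2 0 = j then
        (s.1 ++ [j], s.2 + 1)
      else if descent = [] ∨ (descent.length : Int) ≤ s.2 then
        (s.1 ++ [j], s.2)
      else if j ≠ (perm.length : Int) - 1 ∧ s.2 < (descent.length : Int) then
        (if PySem.List.pyGetD perm (j + 1) 0 ≤
            PySem.List.pyGetD perm (PySem.List.pyGetD descent s.2 0 + 1) 0
         then (s.1 ++ [j], s.2) else s)
      else s)
    ([], 0)).1

-- ===== PORT B =====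
-- inner 'while end + 1 < n and perm[end] <= perm[end + 1]: end += 1' of Source B
-- (the fuel argument only bounds the recursion so it is structural; it is always
--  called with fuel = perm.length, which the loop can never exhaust)
def findRunEnd (perm : List Int) : Nat → Nat → Nat
  | 0, e => e
  | fuel + 1, e =>
    if e + 1 < perm.length ∧
        PySem.List.pyGetD perm (e : Int) 0 ≤ PySem.List.pyGetD perm ((e : Int) + 1) 0 then
      findRunEnd perm fuel (e + 1)
    else e

-- outer 'while start < n' of Source B (same fuel discipline)
def runLoop (perm : List Int) : Nat → Nat → List Int → List Int
  | 0, _, out => out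
  | fuel + 1, start, out =>
    if start < perm.length then
      let e := findRunEnd perm perm.length start
      let out' :=
        if e + 1 < perm.length then
          let lead := PySem.List.pyGetD perm ((e : Int) + 1) 0
          ((PySem.List.pyRange (start : Int) (e : Int) 1).foldl
            (fun acc j =>
              if PySem.List.pyGetD perm (j + 1) 0 ≤ lead then acc ++ [j] else acc) out)
            ++ [(e : Int)]
        else
          out ++ PySem.List.pyRange (start : Int) ((e : Int) + 1) 1
      runLoop perm fuel (e + 1) out'
    else out

def getInsertionPoints_alt (perm : List Int) : List Int := runLoop perm perm.length 0 []

-- ===== PRECONDITION & SPEC =====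
def Spec_getInsertionPoints (perm : List Int) (out : List Int) : Prop := out = getInsertionPoints_alt perm
instance (perm : List Int) (out : List Int) : Decidable (Spec_getInsertionPoints perm out) := by unfold Spec_getInsertionPoints; infer_instance

-- ===== CLAIM (what is proved, stated in full; the proofs are below) =====
def Claim_equal_getInsertionPoints : Prop := ∀ (perm : List Int), Dom_getInsertionPoints perm → Spec_getInsertionPoints perm (getInsertionPoints perm)

-- ===== LEMMAS AND PROOFS =====

-- The (Nat-indexed) list of descent positions of perm.
def descN (perm : List Int) : List Nat :=
  (List.range (perm.length - 1)).filter (fun i => decide (perm.getD (i + 1) 0 < perm.getD i 0))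

-- First descent at or after position j.
def fdN (perm : List Int) (j : Nat) : Option Nat :=
  ((descN perm).filter (fun i => decide (j ≤ i))).head?

-- Whether position j is an insertion point (common characterisation of both programs).
def condN (perm : List Int) (j : Nat) : Bool :=
  match fdN perm j with
  | none => true
  | some i =>
      if i = j then true
      else decide (j ≠ perm.length - 1 ∧ perm.getD (j + 1) 0 ≤ perm.getD (i + 1) 0)

def tgt (perm : List Int) : List Int :=
  ((List.range perm.length).filter (condN perm)).map (fun j : Nat => (j : Int))

-- A's loop body after pushing casts through the range list.
def Astep (perm : List Int) (s : List Int × Int) (j : Nat) : List Int × Int :=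
  if (descN perm).map (fun i : Nat => (i : Int)) ≠ [] ∧
      s.2 < (((descN perm).map (fun i : Nat => (i : Int))).length : Int) ∧
      PySem.List.pyGetD ((descN perm).map (fun i : Nat => (i : Int))) s.2 0 = (j : Int) then
    (s.1 ++ [(j : Int)], s.2 + 1)
  else if (descN perm).map (fun i : Nat => (i : Int)) = [] ∨
      (((descN perm).map (fun i : Nat => (i : Int))).length : Int) ≤ s.2 then
    (s.1 ++ [(j : Int)], s.2)
  else if (j : Int) ≠ (perm.length : Int) - 1 ∧
      s.2 < (((descN perm).map (fun i : Nat => (i : Int))).length : Int) then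
    (if PySem.List.pyGetD perm ((j : Int) + 1) 0 ≤
        PySem.List.pyGetD perm
          (PySem.List.pyGetD ((descN perm).map (fun i : Nat => (i : Int))) s.2 0 + 1) 0
     then (s.1 ++ [(j : Int)], s.2) else s)
  else s

-- ---- generic facts about sorted Nat lists ----

lemma countP_lt_succ (D : List Nat) (hnd : D.Nodup) (j : Nat) :
    D.countP (fun i => decide (i < j + 1)) =
      D.countP (fun i => decide (i < j)) + (if j ∈ D then 1 else 0) := by
  induction D with
  | nil => simp
  | cons d t ih =>
    rcases List.nodup_cons.mp hnd with ⟨hd, ht⟩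
    rw [List.countP_cons, List.countP_cons, ih ht]
    by_cases hdj : d = j
    · subst hdj
      simp [hd]
    · have h1 : (d < j + 1) = (d < j) := by
        apply propext; omega
      simp only [List.mem_cons, show (j = d) = False from by
        apply propext; exact iff_of_false (fun h => hdj h.symm) id, false_or,
        decide_eq_true_eq, h1]
      omega

lemma drop_countP (D : List Nat) (h : D.Pairwise (· < ·)) (j : Nat) :
    D.drop (D.countP (fun i => decide (i < j))) = D.filter (fun i => decide (j ≤ i)) := by
  induction D with
  | nil => simp
  | cons d t ih =>
    rcases List.pairwise_cons.mp h with ⟨hd, ht⟩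
    by_cases hdj : d < j
    · simp [hdj, ih ht, Nat.not_le.mpr hdj]
    · have h0 : t.countP (fun i => decide (i < j)) = 0 := by
        apply List.countP_eq_zero.mpr
        intro x hx
        have := hd x hx
        simp
        omega
      simp [hdj, h0, Nat.le_of_not_lt hdj]
      symm
      apply List.filter_eq_self.mpr
      intro x hx
      have := hd x hx
      simp
      omega

lemma filter_ge_succ (D : List Nat) (h : D.Pairwise (· < ·)) (j : Nat) :
    D.filter (fun i => decide (j ≤ i)) =
      (if j ∈ D then [j] else []) ++ D.filter (fun i => decide (j + 1 ≤ i)) := by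
  induction D with
  | nil => simp
  | cons d t ih =>
    rcases List.pairwise_cons.mp h with ⟨hd, ht⟩
    rcases Nat.lt_trichotomy d j with hdj | hdj | hdj
    · have hne : (j = d) = False := by
        apply propext; constructor
        · omega
        · exact False.elim
      simp only [List.filter_cons, decide_eq_true_eq, Nat.not_le.mpr hdj, if_false,
        show (j + 1 ≤ d) = False from by apply propext; exact iff_of_false (by omega) id,
        List.mem_cons, hne, false_or, ih ht]
    · subst hdj
      have h1 : t.filter (fun i => decide (d ≤ i)) = t := by
        apply List.filter_eq_self.mpr; intro x hx; have := hd x hx; simp; omega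
      have h2 : t.filter (fun i => decide (d + 1 ≤ i)) = t := by
        apply List.filter_eq_self.mpr; intro x hx; have := hd x hx; simp; omega
      have hd' : d ∉ t := fun hm => absurd (hd d hm) (lt_irrefl d)
      simp only [List.filter_cons, decide_eq_true_eq, le_refl, if_true, List.mem_cons,
        true_or, h1, List.singleton_append, List.cons.injEq, true_and,
        show (d + 1 ≤ d) = False from by apply propext; exact iff_of_false (by omega) id,
        if_false]
      exact h2.symm
    · have hnm : j ∉ d :: t := by
        intro hm
        rcases List.mem_cons.mp hm with rfl | hm
        · omega
        · have := hd j hm; omega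
      have h1 : (d :: t).filter (fun i => decide (j ≤ i)) = d :: t := by
        apply List.filter_eq_self.mpr
        intro x hx
        rcases List.mem_cons.mp hx with rfl | hx
        · simp; omega
        · have := hd x hx; simp; omega
      have h2 : (d :: t).filter (fun i => decide (j + 1 ≤ i)) = d :: t := by
        apply List.filter_eq_self.mpr
        intro x hx
        rcases List.mem_cons.mp hx with rfl | hx
        · simp; omega
        · have := hd x hx; simp; omega
      rw [h1, if_neg hnm, List.nil_append, h2]

lemma mem_iff_head (D : List Nat) (h : D.Pairwise (· < ·)) (j : Nat) :
    j ∈ D ↔ (D.filter (fun i => decide (j ≤ i))).head? = some j := by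
  rw [filter_ge_succ D h j]
  by_cases hm : j ∈ D
  · simp [hm]
  · rw [if_neg hm, List.nil_append]
    apply iff_of_false hm
    intro hh
    have h1 := List.mem_of_mem_head? hh
    have h2 := (List.mem_filter.mp h1).2
    simp at h2

-- ---- facts about descN / fdN ----

lemma descN_pairwise (perm : List Int) : (descN perm).Pairwise (· < ·) :=
  List.Pairwise.filter _ List.pairwise_lt_range

lemma mem_descN (perm : List Int) (i : Nat) :
    i ∈ descN perm ↔ i < perm.length - 1 ∧ perm.getD (i + 1) 0 < perm.getD i 0 := by
  simp [descN, List.mem_filter, List.mem_range]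

lemma fdN_mem (perm : List Int) (j i : Nat) (h : fdN perm j = some i) :
    i ∈ descN perm ∧ j ≤ i := by
  have hm := List.mem_of_mem_head? (l := (descN perm).filter (fun i => decide (j ≤ i))) (by simpa [fdN] using h)
  rcases List.mem_filter.mp hm with ⟨h1, h2⟩
  exact ⟨h1, by simpa using h2⟩

lemma mem_descN_iff_fdN (perm : List Int) (j : Nat) :
    j ∈ descN perm ↔ fdN perm j = some j := by
  simpa [fdN] using mem_iff_head (descN perm) (descN_pairwise perm) j

-- ---- A equals the common characterisation ----

lemma getDescents_eq (perm : List Int) :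
    getDescents perm = (descN perm).map (fun i : Nat => (i : Int)) := by
  unfold getDescents descN
  cases hn : perm.length with
  | zero =>
    have h : PySem.List.pyRange 0 (((0 : Nat) : Int) - 1) 1 = [] := by decide
    rw [h]
    simp
  | succ m =>
    have h1 : ((m + 1 : Nat) : Int) - 1 = ((m : Nat) : Int) := by push_cast; ring
    rw [h1, PySem.List.pyRange_zero_natCast, List.foldl_map]
    rw [PySem.List.foldl_congr_mem _ _
      (fun descents (i : Nat) =>
        if perm.getD (i + 1) 0 < perm.getD i 0 then descents ++ [(i : Int)] else descents) _ ?_]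
    · rw [PySem.List.foldl_append_ite (fun i => perm.getD (i + 1) 0 < perm.getD i 0)
        (fun i : Nat => (i : Int))]
      simp
    · intro acc i _
      have h2 : ((i : Int) + 1) = ((i + 1 : Nat) : Int) := by push_cast; ring
      rw [h2, PySem.List.pyGetD_natCast, PySem.List.pyGetD_natCast]

lemma A_loop (perm : List Int) : ∀ (k j : Nat) (acc : List Int),
    (List.range' j k).foldl (Astep perm)
        (acc, (((descN perm).countP (fun i => decide (i < j)) : Nat) : Int))
      = (acc ++ ((List.range' j k).filter (condN perm)).map (fun x : Nat => (x : Int)),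
         (((descN perm).countP (fun i => decide (i < j + k)) : Nat) : Int)) := by
  intro k
  induction k with
  | zero => intro j acc; simp
  | succ k ih =>
    intro j acc
    rw [List.range'_succ, List.foldl_cons]
    have hsorted := descN_pairwise perm
    have hnodup : (descN perm).Nodup := hsorted.imp (fun h => Nat.ne_of_lt h)
    set D := descN perm with hD
    set c := D.countP (fun i => decide (i < j)) with hc
    have hdrop : D.drop c = D.filter (fun i => decide (j ≤ i)) := drop_countP D hsorted j
    have hcount : D.countP (fun i => decide (i < j + 1)) = c + (if j ∈ D then 1 else 0) :=
      countP_lt_succ D hnodup j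
    have hget : PySem.List.pyGetD (D.map (fun i : Nat => (i : Int))) ((c : Nat) : Int) 0
        = ((D.getD c 0 : Nat) : Int) := by
      have h := PySem.List.pyGetD_map (fun i : Nat => (i : Int)) D ((c : Nat) : Int) 0
      rw [PySem.List.pyGetD_natCast D c 0] at h
      simpa using h
    have hstep : Astep perm (acc, ((c : Nat) : Int)) j
        = (acc ++ (if condN perm j then [(j : Int)] else []),
           ((D.countP (fun i => decide (i < j + 1)) : Nat) : Int)) := by
      rw [hcount]
      unfold Astep
      simp only []
      cases hF : fdN perm j with
      | none =>
        have hFnil : D.filter (fun i => decide (j ≤ i)) = [] := by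
          rw [hD]
          exact List.head?_eq_none_iff.mp hF
        have hlen : D.length ≤ c := List.drop_eq_nil_iff.mp (by rw [hdrop, hFnil])
        have hjD : j ∉ D := by
          intro hm
          rw [hD] at hm
          have := (mem_descN_iff_fdN perm j).mp hm
          rw [hF] at this
          simp at this
        have hcond : condN perm j = true := by simp [condN, hF]
        rw [if_neg ?hc1, if_pos ?hc2]
        case hc1 =>
          rintro ⟨-, h2, -⟩
          rw [List.length_map] at h2
          exact absurd (by exact_mod_cast h2 : c < D.length) (Nat.not_lt.mpr hlen)
        case hc2 =>
          right
          rw [List.length_map]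
          exact_mod_cast hlen
        rw [hcond, if_neg hjD]
        simp
      | some i =>
        obtain ⟨hiD', hji⟩ := fdN_mem perm j i hF
        have hiD : i ∈ D := by rw [hD]; exact hiD'
        have hFhead : (D.filter (fun i => decide (j ≤ i))).head? = some i := by
          rw [hD]
          exact hF
        have hFne : D.filter (fun i => decide (j ≤ i)) ≠ [] := by
          intro hnil
          rw [hnil] at hFhead
          simp at hFhead
        have hlt : c < D.length := by
          by_contra hle
          exact hFne (by rw [← hdrop]; exact List.drop_eq_nil_iff.mpr (by omega))
        have hDc : D.getD c 0 = i := by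
          rw [List.getD_eq_getElem?_getD, ← List.head?_drop, hdrop, hFhead]
          rfl
        have hgetc : PySem.List.pyGetD (D.map (fun i : Nat => (i : Int))) ((c : Nat) : Int) 0
            = ((i : Nat) : Int) := by rw [hget, hDc]
        have hDne : D ≠ [] := by
          intro h
          rw [h] at hlt
          simp at hlt
        have hi_lt : i < perm.length - 1 := ((mem_descN perm i).mp hiD').1
        by_cases hij : i = j
        · subst hij
          rw [if_pos ⟨fun h => hDne (List.map_eq_nil_iff.mp h),
            by rw [List.length_map]; exact_mod_cast hlt, by rw [hgetc]⟩]
          have hcond : condN perm i = true := by simp [condN, hF]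
          rw [hcond, if_pos hiD]
          simp
        · have hjD : j ∉ D := by
            intro hm
            rw [hD] at hm
            have := (mem_descN_iff_fdN perm j).mp hm
            rw [hF] at this
            exact hij (Option.some.inj this)
          have hjn : j < perm.length - 1 := by omega
          rw [if_neg ?c1, if_neg ?c2, if_pos ?c3]
          case c1 =>
            rintro ⟨-, -, h3⟩
            rw [hgetc] at h3
            exact hij (by exact_mod_cast h3)
          case c2 =>
            rintro (h | h)
            · exact hDne (List.map_eq_nil_iff.mp h)
            · rw [List.length_map] at h
              have : D.length ≤ c := by exact_mod_cast h
              omega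
          case c3 =>
            constructor
            · intro heq
              omega
            · rw [List.length_map]
              exact_mod_cast hlt
          rw [hgetc]
          have hcast1 : ((j : Int) + 1) = ((j + 1 : Nat) : Int) := by push_cast; ring
          have hcast2 : ((i : Int) + 1) = ((i + 1 : Nat) : Int) := by push_cast; ring
          rw [hcast1, hcast2, PySem.List.pyGetD_natCast, PySem.List.pyGetD_natCast]
          have hcond : condN perm j
              = decide (j ≠ perm.length - 1 ∧ perm.getD (j + 1) 0 ≤ perm.getD (i + 1) 0) := by
            simp [condN, hF, hij]
          rw [hcond, if_neg hjD]
          by_cases hle : perm.getD (j + 1) 0 ≤ perm.getD (i + 1) 0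
          · rw [if_pos hle]
            have hdec : decide (j ≠ perm.length - 1 ∧
                perm.getD (j + 1) 0 ≤ perm.getD (i + 1) 0) = true := by
              rw [decide_eq_true_eq]
              exact ⟨by omega, hle⟩
            rw [hdec]
            simp
          · rw [if_neg hle]
            have hdec : decide (j ≠ perm.length - 1 ∧
                perm.getD (j + 1) 0 ≤ perm.getD (i + 1) 0) = false := by
              rw [decide_eq_false_iff_not]
              rintro ⟨-, h⟩
              exact hle h
            rw [hdec]
            simp
    rw [hstep, ih (j + 1) (acc ++ if condN perm j then [(j : Int)] else [])]
    have hk : j + 1 + k = j + (k + 1) := by omega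
    simp only [hk]
    congr 1
    by_cases hcj : condN perm j
    · simp [hcj]
    · simp [hcj]

lemma A_eq (perm : List Int) : getInsertionPoints perm = tgt perm := by
  show (((PySem.List.pyRange 0 ((perm.length : Int)) 1).foldl
    (fun (s : List Int × Int) j =>
      if getDescents perm ≠ [] ∧ s.2 < ((getDescents perm).length : Int) ∧
          PySem.List.pyGetD (getDescents perm) s.2 0 = j then
        (s.1 ++ [j], s.2 + 1)
      else if getDescents perm = [] ∨ ((getDescents perm).length : Int) ≤ s.2 then
        (s.1 ++ [j], s.2)
      else if j ≠ (perm.length : Int) - 1 ∧ s.2 < ((getDescents perm).length : Int) then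
        (if PySem.List.pyGetD perm (j + 1) 0 ≤
            PySem.List.pyGetD perm (PySem.List.pyGetD (getDescents perm) s.2 0 + 1) 0
         then (s.1 ++ [j], s.2) else s)
      else s)
    ([], 0)).1 : List Int) = tgt perm
  rw [getDescents_eq, PySem.List.pyRange_zero_natCast, List.foldl_map]
  show ((List.foldl (Astep perm) ([], 0) (List.range perm.length)).1 : List Int) = tgt perm
  have h0 : (descN perm).countP (fun i => decide (i < 0)) = 0 :=
    List.countP_eq_zero.mpr (by intro x _; simp)
  have h := A_loop perm perm.length 0 []
  rw [h0, Nat.cast_zero] at h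
  rw [List.range_eq_range', h]
  simp [tgt, List.range_eq_range']

-- ---- B equals the common characterisation ----

lemma pyRange_natCast' (s e : Nat) :
    PySem.List.pyRange (s : Int) (e : Int) 1
      = (List.range' s (e - s)).map (fun k : Nat => (k : Int)) := by
  rw [PySem.List.pyRange_one]
  have h1 : ((e : Int) - (s : Int)).toNat = e - s := by omega
  rw [h1, List.range'_eq_map_range, List.map_map]
  apply List.map_congr_left
  intro k _
  simp

lemma findRunEnd_ge (perm : List Int) : ∀ (fuel e : Nat), e ≤ findRunEnd perm fuel e := by
  intro fuel
  induction fuel with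
  | zero => intro e; simp [findRunEnd]
  | succ fuel ih =>
    intro e
    rw [findRunEnd]
    split
    · exact le_trans (by omega) (ih (e + 1))
    · exact le_rfl

lemma findRunEnd_facts (perm : List Int) : ∀ (fuel s : Nat), s < perm.length →
    perm.length - s ≤ fuel →
    findRunEnd perm fuel s < perm.length ∧
    (∀ j, s ≤ j → j < findRunEnd perm fuel s → perm.getD j 0 ≤ perm.getD (j + 1) 0) ∧
    (findRunEnd perm fuel s + 1 < perm.length →
      perm.getD (findRunEnd perm fuel s + 1) 0 < perm.getD (findRunEnd perm fuel s) 0) := by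
  intro fuel
  induction fuel with
  | zero => intro s hs hf; omega
  | succ fuel ih =>
    intro s hs hf
    rw [findRunEnd]
    split
    next h =>
      obtain ⟨h1, h2⟩ := h
      have h2' : perm.getD s 0 ≤ perm.getD (s + 1) 0 := by
        rw [PySem.List.pyGetD_natCast,
          show ((s : Int) + 1) = ((s + 1 : Nat) : Int) from by push_cast; ring,
          PySem.List.pyGetD_natCast] at h2
        exact h2
      obtain ⟨r1, r2, r3⟩ := ih (s + 1) h1 (by omega)
      refine ⟨r1, ?_, r3⟩
      intro j hj1 hj2
      rcases Nat.eq_or_lt_of_le hj1 with rfl | hj1'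
      · exact h2'
      · exact r2 j hj1' hj2
    next h =>
      push Not at h
      refine ⟨hs, by omega, ?_⟩
      intro h1
      have h2 := h h1
      rw [PySem.List.pyGetD_natCast,
        show ((s : Int) + 1) = ((s + 1 : Nat) : Int) from by push_cast; ring,
        PySem.List.pyGetD_natCast] at h2
      exact h2

lemma fdN_run_some (perm : List Int) (s : Nat) (hs : s < perm.length)
    (he1 : findRunEnd perm perm.length s + 1 < perm.length) :
    ∀ j, s ≤ j → j ≤ findRunEnd perm perm.length s →
      fdN perm j = some (findRunEnd perm perm.length s) := by
  obtain ⟨hlt, hrun, hdes⟩ := findRunEnd_facts perm perm.length s hs (by omega)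
  intro j hj1 hj2
  have heD : findRunEnd perm perm.length s ∈ descN perm :=
    (mem_descN perm (findRunEnd perm perm.length s)).mpr ⟨by omega, hdes he1⟩
  have hfe : ((descN perm).filter (fun i => decide (findRunEnd perm perm.length s ≤ i))).head?
      = some (findRunEnd perm perm.length s) :=
    (mem_iff_head (descN perm) (descN_pairwise perm) (findRunEnd perm perm.length s)).mp heD
  have hcongr : (descN perm).filter (fun i => decide (j ≤ i))
      = (descN perm).filter (fun i => decide (findRunEnd perm perm.length s ≤ i)) := by
    apply List.filter_congr
    intro i hi
    obtain ⟨hi1, hi2⟩ := (mem_descN perm i).mp hi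
    by_cases hji : j ≤ i
    · have hei : findRunEnd perm perm.length s ≤ i := by
        by_contra hlt'
        have := hrun i (by omega) (by omega)
        omega
      simp [hji, hei]
    · have : ¬ findRunEnd perm perm.length s ≤ i := by omega
      simp [hji, this]
  unfold fdN
  rw [hcongr, hfe]

lemma fdN_run_none (perm : List Int) (s : Nat) (hs : s < perm.length)
    (he1 : ¬ findRunEnd perm perm.length s + 1 < perm.length) :
    ∀ j, s ≤ j → fdN perm j = none := by
  obtain ⟨hlt, hrun, _⟩ := findRunEnd_facts perm perm.length s hs (by omega)
  intro j hj
  unfold fdN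
  rw [List.filter_eq_nil_iff.mpr, List.head?_nil]
  intro i hi
  obtain ⟨hi1, hi2⟩ := (mem_descN perm i).mp hi
  simp only [decide_eq_true_eq]
  intro hji
  have := hrun i (by omega) (by omega)
  omega

lemma runLoop_succ (perm : List Int) (fuel s : Nat) (out : List Int) :
    runLoop perm (fuel + 1) s out
      = if s < perm.length then
          runLoop perm fuel (findRunEnd perm perm.length s + 1)
            (if findRunEnd perm perm.length s + 1 < perm.length then
                ((PySem.List.pyRange (s : Int) ((findRunEnd perm perm.length s : Nat) : Int) 1).foldl
                  (fun acc j =>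
                    if PySem.List.pyGetD perm (j + 1) 0 ≤
                        PySem.List.pyGetD perm (((findRunEnd perm perm.length s : Nat) : Int) + 1) 0
                    then acc ++ [j] else acc) out)
                  ++ [((findRunEnd perm perm.length s : Nat) : Int)]
              else out ++ PySem.List.pyRange (s : Int)
                (((findRunEnd perm perm.length s : Nat) : Int) + 1) 1)
        else out := rfl

lemma runLoop_eq (perm : List Int) : ∀ (fuel s : Nat) (out : List Int),
    perm.length - s ≤ fuel →
    runLoop perm fuel s out
      = out ++ ((List.range' s (perm.length - s)).filter (condN perm)).map
          (fun j : Nat => (j : Int)) := by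
  intro fuel
  induction fuel with
  | zero =>
    intro s out hf
    rw [runLoop, show perm.length - s = 0 from by omega]
    simp
  | succ fuel ih =>
    intro s out hf
    rw [runLoop_succ]
    by_cases hs : s < perm.length
    · obtain ⟨hlt, hrun, hdes⟩ := findRunEnd_facts perm perm.length s hs (by omega)
      have hge := findRunEnd_ge perm perm.length s
      rw [if_pos hs]
      by_cases he1 : findRunEnd perm perm.length s + 1 < perm.length
      · rw [if_pos he1, ih (findRunEnd perm perm.length s + 1) _ (by omega)]
        rw [pyRange_natCast' s (findRunEnd perm perm.length s), List.foldl_map]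
        rw [PySem.List.foldl_congr_mem _ _
          (fun (acc : List Int) (k : Nat) =>
            if perm.getD (k + 1) 0 ≤ perm.getD (findRunEnd perm perm.length s + 1) 0
            then acc ++ [(k : Int)] else acc) _ ?_]
        · rw [PySem.List.foldl_append_ite
            (fun k : Nat => perm.getD (k + 1) 0 ≤ perm.getD (findRunEnd perm perm.length s + 1) 0)
            (fun k : Nat => (k : Int))]
          have hP : (List.range' s (findRunEnd perm perm.length s - s)).filter
              (fun k => decide (perm.getD (k + 1) 0
                  ≤ perm.getD (findRunEnd perm perm.length s + 1) 0))
              = (List.range' s (findRunEnd perm perm.length s - s)).filter (condN perm) := by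
            apply List.filter_congr
            intro k hk
            have hk' := List.mem_range'_1.mp hk
            have hne : findRunEnd perm perm.length s ≠ k := by omega
            have hkn : k ≠ perm.length - 1 := by omega
            simp [condN, fdN_run_some perm s hs he1 k (by omega) (by omega), hne, hkn]
          have hconde : condN perm (findRunEnd perm perm.length s) = true := by
            simp [condN, fdN_run_some perm s hs he1 (findRunEnd perm perm.length s) hge le_rfl]
          have hsplit : List.range' s (perm.length - s)
              = List.range' s (findRunEnd perm perm.length s - s)
                ++ (findRunEnd perm perm.length s :: List.range' (findRunEnd perm perm.length s + 1)
                      (perm.length - (findRunEnd perm perm.length s + 1))) := by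
            rw [show perm.length - s
                = (findRunEnd perm perm.length s - s)
                  + ((perm.length - (findRunEnd perm perm.length s + 1)) + 1)
              from by omega]
            rw [← List.range'_append_1]
            congr 1
            rw [show s + (findRunEnd perm perm.length s - s) = findRunEnd perm perm.length s
              from by omega]
            rw [List.range'_succ]
          rw [hP, hsplit, List.filter_append, List.filter_cons, hconde]
          simp [List.append_assoc]
        · intro acc k hk
          rw [show ((k : Int) + 1) = ((k + 1 : Nat) : Int) from by push_cast; ring,
            show ((findRunEnd perm perm.length s : Nat) : Int) + 1
                = ((findRunEnd perm perm.length s + 1 : Nat) : Int) from by push_cast; ring,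
            PySem.List.pyGetD_natCast, PySem.List.pyGetD_natCast]
      · rw [if_neg he1, ih (findRunEnd perm perm.length s + 1) _ (by omega)]
        have hall : (List.range' s (perm.length - s)).filter (condN perm)
            = List.range' s (perm.length - s) := by
          apply List.filter_eq_self.mpr
          intro j hj
          have hj' := List.mem_range'_1.mp hj
          simp [condN, fdN_run_none perm s hs he1 j (by omega)]
        rw [show ((findRunEnd perm perm.length s : Nat) : Int) + 1
              = ((findRunEnd perm perm.length s + 1 : Nat) : Int) from by push_cast; ring,
          pyRange_natCast' s (findRunEnd perm perm.length s + 1), hall,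
          show perm.length - (findRunEnd perm perm.length s + 1) = 0 from by omega,
          show findRunEnd perm perm.length s + 1 - s = perm.length - s from by omega]
        simp
    · rw [if_neg hs, show perm.length - s = 0 from by omega]
      simp

lemma B_eq (perm : List Int) : getInsertionPoints_alt perm = tgt perm := by
  unfold getInsertionPoints_alt
  rw [runLoop_eq perm perm.length 0 [] (by omega)]
  simp [tgt, List.range_eq_range']

-- ===== VERDICT (by name: the statement is the Claim_ definition above) =====
theorem getInsertionPoints_spec : Claim_equal_getInsertionPoints := by
  intro perm _
  unfold Spec_getInsertionPoints
  rw [A_eq, B_eq]
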